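-- pv_equiv track=rewrite | github.com/alokchoudharyguliya/Django | test2.py | extended_poly
-- ===== SOURCE A (Python) =====
-- def extended_poly(b: int, max_power: int = 15) -> str:
--     """Convert to polynomial with powers up to max_power for showing reduction."""
--     terms = []
--     for i in range(max_power, -1, -1):
--         if b & (1 << i):
--             if i == 0:
--                 terms.append("1")
--             elif i == 1:
--                 terms.append("x")
--             else:
--                 terms.append(f"x^{i}")
--     return " + ".join(terms) if terms else "0"
-- ===== SOURCE B (Python) =====
-- def extended_poly(b: int, max_power: int = 15) -> str:
--     """Convert to polynomial with powers up to max_power for showing reduction."""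
--     if max_power < 0:
--         return "0"
--     m = b % (1 << (max_power + 1))  # keep exactly the bits 0..max_power
--     return _chunk(m, 0, max_power + 1) or "0"
--
--
-- def _chunk(m: int, offset: int, width: int) -> str:
--     """Render the bits of m (0 <= m < 2**width) as ' + '-joined descending terms
--     for exponents offset .. offset+width-1; '' if m == 0 (divide and conquer)."""
--     if m == 0:
--         return ""
--     if width <= 1:
--         return "1" if offset == 0 else "x" if offset == 1 else f"x^{offset}"
--     h = width // 2
--     hi = _chunk(m >> h, offset + h, width - h)
--     lo = _chunk(m & ((1 << h) - 1), offset, h)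
--     if hi and lo:
--         return hi + " + " + lo
--     return hi or lo
-- ===== Notes on version B (the rewrite author's own statement) =====
-- stated objective: faster
-- what changed: B replaces A's linear scan over every bit position from max_power down to 0 with a recursive divide-and-conquer: it masks b to its low max_power+1 bits once, then splits that value into high/low halves by width, renders each half recursively and joins the two rendered strings, returning immediately on zero halves so whole empty windows are skipped.
import Mathlib
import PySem

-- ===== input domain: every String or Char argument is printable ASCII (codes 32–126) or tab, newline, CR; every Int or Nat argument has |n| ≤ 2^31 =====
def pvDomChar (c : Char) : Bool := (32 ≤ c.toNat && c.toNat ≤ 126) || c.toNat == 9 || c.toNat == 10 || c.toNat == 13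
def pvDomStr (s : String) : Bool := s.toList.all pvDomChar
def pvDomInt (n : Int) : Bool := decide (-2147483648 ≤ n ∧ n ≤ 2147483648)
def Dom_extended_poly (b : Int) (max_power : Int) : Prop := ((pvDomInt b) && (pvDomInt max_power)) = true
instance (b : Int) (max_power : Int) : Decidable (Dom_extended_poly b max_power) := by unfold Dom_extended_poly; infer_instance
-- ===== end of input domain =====

-- B replaces A's linear scan over every bit position by one mask (b mod 2^(max_power+1)) followed by a
-- recursive divide-and-conquer over the value: split into high/low halves by width, render each half,
-- join the two rendered strings; zero halves return at once, so empty windows are skipped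
-- (objective: faster; a timing run measured B faster at the largest size).

-- ===== PORT A =====
-- A: for i in range(max_power, -1, -1): test b & (1 << i), append "1"/"x"/f"x^{i}"; join or "0".
-- (i ≥ 0 throughout the range, so i.toNat is exact for Python's 1 << i.)
def extended_poly (b : Int) (max_power : Int) : String :=
  let terms : List String :=
    (PySem.List.pyRange max_power (-1) (-1)).foldl (fun terms i =>
      if PySem.Int.band b ((1 : Int) <<< i.toNat) ≠ 0 then
        if i = 0 then terms ++ ["1"]
        else if i = 1 then terms ++ ["x"]
        else terms ++ ["x^" ++ PySem.Int.toStr i]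
      else terms) []
  if terms ≠ [] then PySem.Str.join " + " terms else "0"

-- ===== PORT B =====
-- _chunk: m, offset, width are Python ints; m is always ≥ 0 here (a nonnegative remainder, then
-- shifted/masked), width ≥ 1 on every call, so the recursion on width terminates.
def pvChunk (m : Int) (offset : Int) (width : Int) : String :=
  if m = 0 then ""
  else if width ≤ 1 then
    (if offset = 0 then "1" else if offset = 1 then "x" else "x^" ++ PySem.Int.toStr offset)
  else
    let h := PySem.Int.floordiv width 2
    let hi := pvChunk (m >>> h.toNat) (offset + h) (width - h)
    let lo := pvChunk (PySem.Int.band m (((1 : Int) <<< h.toNat) - 1)) offset h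
    if hi ≠ "" ∧ lo ≠ "" then hi ++ " + " ++ lo
    else if hi ≠ "" then hi else lo
termination_by width.toNat
decreasing_by
  · have : PySem.Int.floordiv width 2 = width / 2 := PySem.Int.floordiv_eq_ediv_of_pos (by norm_num)
    omega
  · have : PySem.Int.floordiv width 2 = width / 2 := PySem.Int.floordiv_eq_ediv_of_pos (by norm_num)
    omega

def extended_poly_alt (b : Int) (max_power : Int) : String :=
  if max_power < 0 then "0"
  else
    let m := PySem.Int.mod b ((1 : Int) <<< (max_power + 1).toNat)
    let s := pvChunk m 0 (max_power + 1)
    if s ≠ "" then s else "0"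

-- ===== PRECONDITION & SPEC =====
def Spec_extended_poly (b : Int) (max_power : Int) (out : String) : Prop := out = extended_poly_alt b max_power
instance (b : Int) (max_power : Int) (out : String) : Decidable (Spec_extended_poly b max_power out) := by unfold Spec_extended_poly; infer_instance

-- ===== CLAIM (what is proved, stated in full; the proofs are below) =====
def Claim_equal_extended_poly : Prop := ∀ (b : Int) (max_power : Int), Dom_extended_poly b max_power → Spec_extended_poly b max_power (extended_poly b max_power)

-- ===== LEMMAS AND PROOFS =====

-- the term string for exponent i
def pvTerm (i : Int) : String :=
  if i = 0 then "1" else if i = 1 then "x" else "x^" ++ PySem.Int.toStr i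

-- the descending term list for the bits of m in window [off, off+w)
def pvG (m : Nat) (off : Int) (w : Nat) : List String :=
  (((List.range w).filter (m.testBit ·)).reverse).map (fun k : Nat => pvTerm (off + (k : Int)))

theorem pvJoin_nil : PySem.Str.join " + " ([] : List String) = "" := by decide

theorem pvJoin_singleton (a : String) : PySem.Str.join " + " [a] = a := by
  simp [PySem.Str.join, PySem.Chars.join_singleton]

theorem pvJoin_cons (a b : String) (L : List String) :
    PySem.Str.join " + " (a :: b :: L) = a ++ " + " ++ PySem.Str.join " + " (b :: L) := by
  apply String.toList_injective
  simp [PySem.Str.join, PySem.Chars.join_cons_cons]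

theorem pvJoin_append (L1 L2 : List String) (h1 : L1 ≠ []) (h2 : L2 ≠ []) :
    PySem.Str.join " + " (L1 ++ L2) =
      PySem.Str.join " + " L1 ++ " + " ++ PySem.Str.join " + " L2 := by
  induction L1 with
  | nil => exact absurd rfl h1
  | cons a L1 IH =>
    cases L1 with
    | nil =>
      cases L2 with
      | nil => exact absurd rfl h2
      | cons c L2 => rw [List.singleton_append, pvJoin_cons, pvJoin_singleton]
    | cons b L1 =>
      rw [show (a :: b :: L1) ++ L2 = a :: b :: (L1 ++ L2) from rfl, pvJoin_cons,
        show b :: (L1 ++ L2) = (b :: L1) ++ L2 from rfl, IH (by simp), pvJoin_cons]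
      simp [String.append_assoc]

theorem pvTerm_ne_empty (i : Int) : pvTerm i ≠ "" := by
  unfold pvTerm
  split_ifs
  · decide
  · decide
  · intro h
    have := congrArg String.toList h
    rw [String.toList_append] at this
    simp at this

theorem pvJoin_ne_empty (L : List String) (hL : L ≠ []) (hne : ∀ s ∈ L, s ≠ "") :
    PySem.Str.join " + " L ≠ "" := by
  cases L with
  | nil => exact absurd rfl hL
  | cons a L =>
    cases L with
    | nil =>
      rw [pvJoin_singleton]
      exact hne a (by simp)
    | cons b L =>
      rw [pvJoin_cons]
      intro h
      have := congrArg String.toList h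
      rw [String.toList_append, String.toList_append] at this
      simp at this

theorem pvG_ne_empty_elems (m : Nat) (off : Int) (w : Nat) : ∀ s ∈ pvG m off w, s ≠ "" := by
  intro s hs
  unfold pvG at hs
  obtain ⟨k, _, rfl⟩ := List.mem_map.mp hs
  exact pvTerm_ne_empty _

-- B's divide-and-conquer renders exactly the descending term list of the bit window
theorem pvChunk_eq (w : Nat) : ∀ (m : Nat), m < 2 ^ w → ∀ (off : Int),
    pvChunk (m : Int) off (w : Int) = PySem.Str.join " + " (pvG m off w) := by
  induction w using Nat.strong_induction_on with
  | _ w IH =>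
    intro m hm off
    rw [pvChunk]
    by_cases h0 : m = 0
    · subst h0
      rw [if_pos (by norm_num)]
      simp [pvG, Nat.zero_testBit, pvJoin_nil]
    · rw [if_neg (by exact_mod_cast h0)]
      by_cases hw1 : (w : Int) ≤ 1
      · have hw : w = 1 := by
          have : w ≠ 0 := by rintro rfl; simp at hm; omega
          omega
        subst hw
        rw [if_pos (by norm_num)]
        have hm1 : m = 1 := by omega
        subst hm1
        simp [pvG, List.range_succ, pvJoin_singleton, pvTerm]
      · rw [if_neg hw1]
        have hw2 : 2 ≤ w := by omega
        have hfd : PySem.Int.floordiv (w : Int) 2 = ((w / 2 : Nat) : Int) := by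
          rw [PySem.Int.floordiv_eq_ediv_of_pos (by norm_num)]
          omega
        set H : Nat := w / 2 with hH
        have hH1 : 1 ≤ H := by omega
        have hHw : H < w := by omega
        set W2 : Nat := w - H with hW2
        have hsplit : w = H + W2 := by omega
        -- the two recursive arguments, as naturals
        have hhiarg : (m : Int) >>> (((H : Nat) : Int)).toNat = ((m >>> H : Nat) : Int) := by
          rw [Int.toNat_natCast, Int.shiftRight_eq_div_pow, Nat.shiftRight_eq_div_pow]
          push_cast
          omega
        have hloarg : PySem.Int.band (m : Int) (((1 : Int) <<< (((H : Nat) : Int)).toNat) - 1)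
            = ((m % 2 ^ H : Nat) : Int) := by
          rw [Int.toNat_natCast, Int.shiftLeft_eq]
          have h1 : (1 : Int) * 2 ^ H - 1 = ((2 ^ H - 1 : Nat) : Int) := by
            push_cast [Nat.one_le_two_pow]
            ring
          rw [h1, PySem.Int.band_natCast, Nat.and_two_pow_sub_one_eq_mod]
        have hhibound : m >>> H < 2 ^ W2 := by
          rw [Nat.shiftRight_eq_div_pow]
          have : m < 2 ^ H * 2 ^ W2 := by rw [← pow_add, ← hsplit]; exact hm
          exact Nat.div_lt_of_lt_mul (by omega)
        have hlobound : m % 2 ^ H < 2 ^ H := Nat.mod_lt _ (Nat.two_pow_pos H)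
        have hWI : (w : Int) - ((H : Nat) : Int) = ((W2 : Nat) : Int) := by
          omega
        simp only [hfd, hhiarg, hloarg, hWI]
        rw [IH W2 (by omega) _ hhibound (off + ((H : Nat) : Int)),
          IH H (by omega) _ hlobound off]
        -- split the window
        have hGsplit : pvG m off w = pvG (m >>> H) (off + ((H : Nat) : Int)) W2 ++ pvG (m % 2 ^ H) off H := by
          unfold pvG
          rw [hsplit, List.range_add, List.filter_append, List.reverse_append, List.map_append]
          congr 1
          · rw [List.filter_map,
              show ((fun x => m.testBit x) ∘ fun x => H + x) = fun x => (m >>> H).testBit x from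
                funext fun x => by simp [Function.comp, Nat.testBit_shiftRight],
              ← List.map_reverse, List.map_map]
            apply List.map_congr_left
            intro k _
            simp only [Function.comp]
            congr 1
            push_cast
            ring
          · have hfl : (List.range H).filter (fun x => m.testBit x)
                = (List.range H).filter (fun x => (m % 2 ^ H).testBit x) := by
              apply List.filter_congr
              intro k hk
              have hkH : k < H := List.mem_range.mp hk
              rw [Nat.testBit_mod_two_pow]
              simp [hkH]
            rw [hfl]
        rw [hGsplit]
        -- combine according to emptiness of the two halves
        set Ghi := pvG (m >>> H) (off + ((H : Nat) : Int)) W2 with hGhi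
        set Glo := pvG (m % 2 ^ H) off H with hGlo
        by_cases hhi : Ghi = []
        · by_cases hlo : Glo = []
          · simp [hhi, hlo, pvJoin_nil]
          · have hlone := pvJoin_ne_empty Glo hlo (hGlo ▸ pvG_ne_empty_elems _ _ _)
            simp [hhi, pvJoin_nil, hlone]
        · have hhine := pvJoin_ne_empty Ghi hhi (hGhi ▸ pvG_ne_empty_elems _ _ _)
          by_cases hlo : Glo = []
          · simp [hlo, pvJoin_nil, hhine]
          · have hlone := pvJoin_ne_empty Glo hlo (hGlo ▸ pvG_ne_empty_elems _ _ _)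
            rw [pvJoin_append Ghi Glo hhi hlo, if_pos ⟨hhine, hlone⟩]

-- complement bit arithmetic for the negative case of band
theorem testBit_two_pow_sub_one_sub (N k c' : Nat) (hk : k < N) (hc : c' < 2 ^ N) :
    ((2 ^ N - 1 - c').testBit k) = !(c'.testBit k) := by
  have hQ : 0 < 2 ^ k := Nat.two_pow_pos k
  have hdm : c' = 2 ^ k * (c' / 2 ^ k) + c' % 2 ^ k := (Nat.div_add_mod c' (2 ^ k)).symm
  have hu : c' % 2 ^ k < 2 ^ k := Nat.mod_lt _ hQ
  have hN : 2 ^ N = 2 ^ (N - k) * 2 ^ k := by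
    rw [← pow_add]
    congr 1
    omega
  have hP2 : 2 ^ (N - k) = 2 * 2 ^ (N - k - 1) := by
    rw [← pow_succ']
    congr 1
    omega
  have hd : c' / 2 ^ k < 2 ^ (N - k) := by
    rw [Nat.div_lt_iff_lt_mul hQ, ← hN]
    exact hc
  have key1 : 2 ^ N - 1 - c' = 2 ^ k * (2 ^ (N - k) - 1 - c' / 2 ^ k) + (2 ^ k - 1 - c' % 2 ^ k) := by
    have hPN : 0 < 2 ^ N := Nat.two_pow_pos N
    have hPNk : 0 < 2 ^ (N - k) := Nat.two_pow_pos (N - k)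
    generalize hD : c' / 2 ^ k = D at hdm hd ⊢
    generalize hU : c' % 2 ^ k = U at hdm hu ⊢
    have hNz : (2 : Int) ^ N = 2 ^ (N - k) * 2 ^ k := by exact_mod_cast hN
    have hdmz : (c' : Int) = 2 ^ k * (D : Int) + (U : Int) := by exact_mod_cast hdm
    zify [show (1 : Nat) ≤ 2 ^ N from by omega, show c' ≤ 2 ^ N - 1 from by omega,
          show (1 : Nat) ≤ 2 ^ (N - k) from by omega,
          show D ≤ 2 ^ (N - k) - 1 from by omega,
          show (1 : Nat) ≤ 2 ^ k from by omega, show U ≤ 2 ^ k - 1 from by omega]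
    linear_combination hNz - hdmz
  have key : (2 ^ N - 1 - c') / 2 ^ k = 2 ^ (N - k) - 1 - c' / 2 ^ k := by
    rw [key1, Nat.mul_add_div hQ,
      Nat.div_eq_of_lt (show 2 ^ k - 1 - c' % 2 ^ k < 2 ^ k from by omega), Nat.add_zero]
  rw [Nat.testBit_eq_decide_div_mod_eq, Nat.testBit_eq_decide_div_mod_eq, key, ← decide_not,
    decide_eq_decide]
  omega

-- Python's test b & (1 << k) sees exactly bit k of b mod 2^N, for k < N
theorem band_shift_eq_testBit (b : Int) (N k : Nat) (hk : k < N) :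
    (PySem.Int.band b ((1 : Int) <<< k) ≠ 0) ↔ ((b % (2 ^ N : Nat)).toNat).testBit k := by
  have hshl : ((1 : Int) <<< k) = ((2 ^ k : Nat) : Int) := by
    rw [Int.shiftLeft_eq]
    push_cast
    ring
  have hQ : 0 < 2 ^ k := Nat.two_pow_pos k
  have hPN : 0 < 2 ^ N := Nat.two_pow_pos N
  rw [hshl]
  by_cases hb : 0 ≤ b
  · rw [PySem.Int.band_of_nonneg hb (by positivity)]
    have hbn : b = (b.toNat : Int) := (Int.toNat_of_nonneg hb).symm
    rw [hbn]
    have h2 : ((b.toNat : Int) % ((2 ^ N : Nat) : Int)).toNat = b.toNat % 2 ^ N := by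
      rw [← Int.natCast_emod]
      exact Int.toNat_natCast _
    rw [h2, Nat.testBit_mod_two_pow]
    simp only [Int.toNat_natCast]
    rw [Nat.and_two_pow]
    simp [hk]
  · replace hb : b < 0 := by omega
    set c : Nat := (-b - 1).toNat with hcdef
    have hbc : b = -(c : Int) - 1 := by rw [hcdef]; omega
    have hband : PySem.Int.band b ((2 ^ k : Nat) : Int) = ((2 ^ k - (c.testBit k).toNat * 2 ^ k : Nat) : Int) := by
      rw [PySem.Int.band]
      rw [if_neg (by omega), if_pos (by positivity)]
      rw [Int.toNat_natCast, ← hcdef, Nat.and_comm, Nat.and_two_pow]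
    have hmod : b % ((2 ^ N : Nat) : Int) = ((2 ^ N - 1 - c % 2 ^ N : Nat) : Int) := by
      have hdm : c % 2 ^ N + 2 ^ N * (c / 2 ^ N) = c := Nat.mod_add_div c (2 ^ N)
      have hmn : c % 2 ^ N < 2 ^ N := Nat.mod_lt _ hPN
      generalize hD : c / 2 ^ N = D at hdm
      generalize hU : c % 2 ^ N = U at hdm hmn ⊢
      have step : b % ((2 ^ N : Nat) : Int) = (b + ((2 ^ N : Nat) : Int) * ((D + 1 : Nat) : Int)) % ((2 ^ N : Nat) : Int) :=
        (Int.add_mul_emod_self_left b ((2 ^ N : Nat) : Int) ((D + 1 : Nat) : Int)).symm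
      rw [step]
      have hval : b + ((2 ^ N : Nat) : Int) * ((D + 1 : Nat) : Int) = ((2 ^ N - 1 - U : Nat) : Int) := by
        rw [hbc]
        have hdmz : (U : Int) + (2 : Int) ^ N * (D : Int) = (c : Int) := by
          exact_mod_cast hdm
        zify [show (1 : Nat) ≤ 2 ^ N from by omega, show U ≤ 2 ^ N - 1 from by omega]
        linear_combination hdmz
      rw [hval]
      exact Int.emod_eq_of_lt (by positivity)
        (by exact_mod_cast (show 2 ^ N - 1 - U < 2 ^ N from by omega))
    rw [hband, hmod, Int.toNat_natCast,
      testBit_two_pow_sub_one_sub N k _ hk (Nat.mod_lt _ hPN), Nat.testBit_mod_two_pow]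
    rcases Bool.eq_false_or_eq_true (c.testBit k) with h | h <;> simp [h, hk]

-- ===== VERDICT (by name: the statement is the Claim_ definition above) =====
theorem extended_poly_spec : Claim_equal_extended_poly := by
  unfold Claim_equal_extended_poly Spec_extended_poly
  intro b mp _
  unfold extended_poly extended_poly_alt
  by_cases hmp : mp < 0
  · rw [if_pos hmp, PySem.List.pyRange_neg_one_eq_nil (by omega)]
    simp
  · rw [if_neg hmp]
    simp only [Int.shiftLeft_natCast_right]
    have hN : (mp + 1).toNat = (mp.toNat + 1) := by omega
    set N : Nat := mp.toNat + 1 with hNdef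
    have hmask : ((1 : Int) <<< N) = ((2 ^ N : Nat) : Int) := by
      rw [Int.shiftLeft_eq]
      push_cast
      ring
    have hmodeq : PySem.Int.mod b ((1 : Int) <<< (mp + 1).toNat) = b % ((2 ^ N : Nat) : Int) := by
      rw [hN, hmask]
      exact PySem.Int.mod_eq_emod_of_pos (by positivity)
    have hr0 : 0 ≤ b % ((2 ^ N : Nat) : Int) := Int.emod_nonneg b (by positivity)
    set m : Nat := (b % ((2 ^ N : Nat) : Int)).toNat with hm
    have hmlt : m < 2 ^ N := by
      have := Int.emod_lt_of_pos b (show (0 : Int) < ((2 ^ N : Nat) : Int) from by positivity)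
      omega
    have hmcast : b % ((2 ^ N : Nat) : Int) = (m : Int) := by omega
    have hNI : mp + 1 = ((N : Nat) : Int) := by omega
    -- B side: the divide-and-conquer renders the full window [0, N)
    have hB : pvChunk (PySem.Int.mod b ((1 : Int) <<< (mp + 1).toNat)) 0 (mp + 1)
        = PySem.Str.join " + " (pvG m 0 N) := by
      rw [hmodeq, hmcast, hNI, pvChunk_eq N m hmlt 0]
    -- A side: canonical loop shape
    have hbody : (fun (terms : List String) (i : Int) =>
          if PySem.Int.band b ((1 : Int) <<< i.toNat) ≠ 0 then
            if i = 0 then terms ++ ["1"]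
            else if i = 1 then terms ++ ["x"]
            else terms ++ ["x^" ++ PySem.Int.toStr i]
          else terms)
        = (fun (acc : List String) (i : Int) =>
            if (fun j : Int => decide (PySem.Int.band b ((1 : Int) <<< j.toNat) ≠ 0)) i = true
            then acc ++ [pvTerm i] else acc) := by
      funext terms i
      simp only [decide_eq_true_eq, pvTerm]
      split_ifs <;> rfl
    have hrange : PySem.List.pyRange mp (-1) (-1)
        = ((List.range N).map (fun k : Nat => (k : Int))).reverse := by
      rw [PySem.List.pyRange_neg_one_eq_reverse]
      norm_num
      rw [PySem.List.pyRange_zero, hN]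
    have hA : (PySem.List.pyRange mp (-1) (-1)).foldl (fun (terms : List String) (i : Int) =>
          if PySem.Int.band b ((1 : Int) <<< i.toNat) ≠ 0 then
            if i = 0 then terms ++ ["1"]
            else if i = 1 then terms ++ ["x"]
            else terms ++ ["x^" ++ PySem.Int.toStr i]
          else terms) []
        = pvG m 0 N := by
      rw [hbody, hrange, PySem.List.foldl_append_if]
      rw [List.filter_reverse, List.filter_map]
      have hq : List.filter ((fun j : Int => decide (PySem.Int.band b ((1 : Int) <<< j.toNat) ≠ 0)) ∘ (fun k : Nat => (k : Int))) (List.range N)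
          = List.filter (fun k => m.testBit k) (List.range N) := by
        apply List.filter_congr
        intro k hkmem
        have hk : k < N := List.mem_range.mp hkmem
        simp only [Function.comp, Int.toNat_natCast]
        rw [hm]
        have h2 := band_shift_eq_testBit b N k hk
        cases hbit : (b % ((2 ^ N : Nat) : Int)).toNat.testBit k <;> rw [hbit] at h2 <;>
          simp at h2 <;> simp [h2]
      rw [hq]
      unfold pvG
      simp [List.map_map, Function.comp]
    rw [hA, hB]
    by_cases hnil : pvG m 0 N = []
    · simp [hnil, pvJoin_nil]
    · have := pvJoin_ne_empty (pvG m 0 N) hnil (pvG_ne_empty_elems m 0 N)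
      simp [hnil, this]
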